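-- pv_equiv track=rewrite | github.com/Park-Young-Hun/Algorithm | Python/BaekJoon/센서_2212.py | solution
-- ===== SOURCE A (Python) =====
-- def solution(n, k, sensors):
--     answer = 0
--     sections = []
--
--     sensors = list(set(sensors))
--     sensors.sort()
--
--     if k >= len(sensors):
--         return 0
--
--     for i in range(len(sensors)-1):
--         sections.append(sensors[i+1] - sensors[i])
--
--     sections.sort()
--
--     for _ in range(k-1):
--         sections.pop()
--
--     for section in sections:
--         answer += section
--
--     return answer
-- ===== SOURCE B (Python) =====
-- def solution(n, k, sensors):
--     s = sorted(set(sensors))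
--     if not s or k >= len(s):
--         return 0
--     gaps = [b - a for a, b in zip(s, s[1:])]
--     total = s[-1] - s[0]
--     for _ in range(k - 1):
--         g = max(gaps)
--         gaps.remove(g)
--         total -= g
--     return total
-- ===== Notes on version B (the rewrite author's own statement) =====
-- stated objective: alternative
-- what changed: B never sorts the gaps: it telescopes the covered span to last-first and then k-1 times selects the maximum gap, removes it and subtracts it (repeated selection), replacing A's gap sort + pop loop + summation loop; O(n*k) selection trades against A's O(n log n) sort.
import Mathlib
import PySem

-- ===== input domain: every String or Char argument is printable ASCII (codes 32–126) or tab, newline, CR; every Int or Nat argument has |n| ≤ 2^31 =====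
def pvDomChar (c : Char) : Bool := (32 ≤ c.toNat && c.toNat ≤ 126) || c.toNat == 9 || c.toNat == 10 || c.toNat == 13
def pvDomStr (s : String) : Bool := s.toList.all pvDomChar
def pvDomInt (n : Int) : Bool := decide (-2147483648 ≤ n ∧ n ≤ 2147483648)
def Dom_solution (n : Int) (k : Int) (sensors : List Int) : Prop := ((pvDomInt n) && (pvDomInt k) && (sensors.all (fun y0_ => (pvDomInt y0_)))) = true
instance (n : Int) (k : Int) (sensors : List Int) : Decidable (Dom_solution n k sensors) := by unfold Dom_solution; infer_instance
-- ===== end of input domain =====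

-- B never sorts the gap list: it telescopes the span to last-first and then k-1 times
-- selects the maximum gap, removes it and subtracts it (repeated selection instead of
-- A's gap sort + pop loop + summation loop); alternative decomposition, not claimed faster.

-- ===== PORT A =====
-- sections.pop() is ported as dropLast (the popped value is discarded by A; range(k-1)
-- never exceeds the section count when the guard k >= len(sensors) fails, so no IndexError).
def solution (n : Int) (k : Int) (sensors : List Int) : Int :=
  let answer : Int := 0
  let sections : List Int := []
  let s := PySem.List.sorted (PySem.Set.ofList sensors) (fun x : Int => x) false
  if k ≥ (s.length : Int) then 0
  else
    let sections := (PySem.List.pyRange 0 ((s.length : Int) - 1) 1).foldl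
      (fun acc i => acc ++ [PySem.List.pyGetD s (i+1) 0 - PySem.List.pyGetD s i 0]) sections
    let sections := PySem.List.sorted sections (fun x : Int => x) false
    let sections := (PySem.List.pyRange 0 (k-1) 1).foldl (fun acc _ => acc.dropLast) sections
    sections.foldl (fun a x => a + x) answer

-- ===== PORT B =====
-- max(gaps)/gaps.remove(g) are ported with PySem.List.max?/remove?; their `none` cases
-- (Python's ValueError) are defaulted but unreachable: the loop runs k-1 < len(gaps) times.
def solution_alt (n : Int) (k : Int) (sensors : List Int) : Int :=
  let s := PySem.List.sorted (PySem.Set.ofList sensors) (fun x : Int => x) false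
  if s = [] ∨ k ≥ (s.length : Int) then 0
  else
    let gaps := (s.zip (PySem.List.slice s (some 1) none)).map (fun p => p.2 - p.1)
    let total := PySem.List.pyGetD s (-1) 0 - PySem.List.pyGetD s 0 0
    let st := (PySem.List.pyRange 0 (k-1) 1).foldl
      (fun (st : List Int × Int) _ =>
        match PySem.List.max? st.1 (fun x : Int => x) with
        | none => st
        | some g => ((PySem.List.remove? st.1 g).getD st.1, st.2 - g)) (gaps, total)
    st.2

-- ===== PRECONDITION & SPEC =====
def Spec_solution (n : Int) (k : Int) (sensors : List Int) (out : Int) : Prop := out = solution_alt n k sensors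
instance (n : Int) (k : Int) (sensors : List Int) (out : Int) : Decidable (Spec_solution n k sensors out) := by unfold Spec_solution; infer_instance

-- ===== CLAIM (what is proved, stated in full; the proofs are below) =====
def Claim_equal_solution : Prop := ∀ (n : Int) (k : Int) (sensors : List Int), Dom_solution n k sensors → Spec_solution n k sensors (solution n k sensors)

-- ===== LEMMAS AND PROOFS =====

-- A's index loop over range(len(s)-1) builds exactly B's zip-comprehension gap list.
theorem gaps_eq (s : List Int) :
    (PySem.List.pyRange 0 ((s.length : Int) - 1) 1).foldl
      (fun acc i => acc ++ [PySem.List.pyGetD s (i+1) 0 - PySem.List.pyGetD s i 0]) []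
    = (s.zip (PySem.List.slice s (some 1) none)).map (fun p => p.2 - p.1) := by
  rw [PySem.List.foldl_append_singleton_eq_map, PySem.List.slice_from s (by norm_num),
      PySem.List.pyRange_one]
  apply List.ext_getElem
  · simp
  · intro i h1 h2
    simp only [List.nil_append, List.getElem_map, List.getElem_range, List.getElem_zip]
    have hl : i < s.length - 1 := by simp at h1; omega
    have e1 : ((0:Int) + (i:Int)) + 1 = ((i+1 : Nat) : Int) := by push_cast; ring
    have e2 : ((0:Int) + (i:Int)) = ((i : Nat) : Int) := by norm_num
    rw [e1, e2, PySem.List.pyGetD_natCast, PySem.List.pyGetD_natCast]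
    simp [List.getD_eq_getElem?_getD,
      List.getElem?_eq_getElem (by omega : i+1 < s.length),
      List.getElem?_eq_getElem (by omega : i < s.length)]

-- A's pop loop removes the last element once per loop iteration: it leaves a prefix.
theorem pop_loop_eq_take (r : List Int) (l : List Int) :
    r.foldl (fun acc _ => acc.dropLast) l = l.take (l.length - r.length) := by
  induction r generalizing l with
  | nil => simp
  | cons x r ih =>
    rw [List.foldl_cons, ih, List.dropLast_eq_take]
    simp only [List.take_take, List.length_take, List.length_cons]
    congr 1
    omega

-- The gap sum telescopes to last - first.
theorem gaps_sum_telescope (a : Int) (s : List Int) :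
    (((a::s).zip s).map (fun p => p.2 - p.1)).sum = (a::s).getLast (by simp) - a := by
  induction s generalizing a with
  | nil => simp
  | cons b t ih =>
    have := ih b
    simp only [List.zip_cons_cons, List.map_cons, List.sum_cons] at this ⊢
    rw [List.getLast_cons_cons]
    omega

theorem pyGetD_cons_neg_one (a : Int) (t : List Int) :
    PySem.List.pyGetD (a::t) (-1) 0 = (a::t).getLast (by simp) := by
  simp [PySem.List.pyGetD, PySem.List.pyGet?, PySem.List.pyIdx?, List.getLast_eq_getElem]
  rfl

theorem foldl_add_eq_sum (l : List Int) (init : Int) :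
    l.foldl (fun a x => a + x) init = init + l.sum := by
  induction l generalizing init with
  | nil => simp
  | cons x t ih => simp [List.foldl_cons, ih, add_assoc]

-- In an ascending-sorted nonempty list, every element is ≤ the last one.
theorem le_getLast_of_pairwise (p : List Int) (hp : p.Pairwise (· ≤ ·)) (h : p ≠ [])
    (y : Int) (hy : y ∈ p) : y ≤ p.getLast h := by
  induction p with
  | nil => exact absurd rfl h
  | cons a t ih =>
    rcases List.mem_cons.mp hy with rfl | hyt
    · cases t with
      | nil => simp
      | cons b u =>
        rw [List.getLast_cons_cons]
        exact (List.pairwise_cons.mp hp).1 _ (List.getLast_mem _)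
    · have ht : t ≠ [] := List.ne_nil_of_mem hyt
      rw [List.getLast_cons ht]
      exact ih (List.pairwise_cons.mp hp).2 ht hyt

-- B's selection loop invariant: if the bag g is a permutation of an ascending-sorted
-- list p with at most |p| iterations left and t = sum g, then the final total is the
-- sum of the prefix of p that survives removing one maximum per iteration.
theorem bLoop (r : List Int) (p g : List Int) (t : Int)
    (hperm : g.Perm p) (hsorted : p.Pairwise (· ≤ ·)) (hsum : t = g.sum)
    (hlen : r.length ≤ p.length) :
    (r.foldl
      (fun (st : List Int × Int) _ =>
        match PySem.List.max? st.1 (fun x : Int => x) with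
        | none => st
        | some gmax => ((PySem.List.remove? st.1 gmax).getD st.1, st.2 - gmax)) (g, t)).2
    = (p.take (p.length - r.length)).sum := by
  induction r generalizing p g t with
  | nil => simpa using hsum.trans hperm.sum_eq
  | cons x r ih =>
    have hpne : p ≠ [] := by intro h; subst h; simp at hlen
    have hgne : g ≠ [] := fun h => hpne (List.nil_perm.mp (h ▸ hperm))
    obtain ⟨M, hM⟩ : ∃ M, PySem.List.max? g (fun x : Int => x) = some M := by
      cases hmx : PySem.List.max? g (fun x : Int => x) with
      | none => exact absurd ((PySem.List.max?_eq_none_iff g _).mp hmx) hgne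
      | some M => exact ⟨M, rfl⟩
    have hMg : M ∈ g := PySem.List.max?_mem hM
    have hMmax : ∀ y ∈ g, y ≤ M := fun y hy => PySem.List.max?_isMax hM y hy
    -- the selected maximum is the last element of the sorted p
    have hMlast : M = p.getLast hpne := by
      have h1 : M ≤ p.getLast hpne :=
        le_getLast_of_pairwise p hsorted hpne M (hperm.mem_iff.mp hMg)
      have h2 : p.getLast hpne ≤ M :=
        hMmax _ (hperm.mem_iff.mpr (List.getLast_mem hpne))
      omega
    have hrem : PySem.List.remove? g M = some (g.erase M) :=
      PySem.List.remove?_eq_some_erase g M hMg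
    have hstep : (List.foldl
        (fun (st : List Int × Int) _ =>
          match PySem.List.max? st.1 (fun x : Int => x) with
          | none => st
          | some gmax => ((PySem.List.remove? st.1 gmax).getD st.1, st.2 - gmax)) (g, t) (x :: r))
        = List.foldl
          (fun (st : List Int × Int) _ =>
            match PySem.List.max? st.1 (fun x : Int => x) with
            | none => st
            | some gmax => ((PySem.List.remove? st.1 gmax).getD st.1, st.2 - gmax))
          (g.erase M, t - M) r := by
      simp [List.foldl_cons, hM, hrem]
    rw [hstep]
    -- new permutation: g.erase M ~ p.dropLast
    have hpdecomp : p = p.dropLast ++ [M] := by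
      conv_lhs => rw [← List.dropLast_append_getLast hpne]
      rw [hMlast]
    have hperm' : (g.erase M).Perm p.dropLast := by
      have h1 : (M :: g.erase M).Perm g := (List.perm_cons_erase hMg).symm
      have h2 : g.Perm (M :: p.dropLast) := by
        calc g.Perm p := hperm
        _ = p.dropLast ++ [M] := hpdecomp
        _ |>.Perm (M :: p.dropLast) := by
          simpa using List.perm_append_comm (l₁ := p.dropLast) (l₂ := [M])
      exact (h1.trans h2).cons_inv
    have hsum' : t - M = (g.erase M).sum := by
      have := (List.perm_cons_erase hMg).sum_eq
      simp at this
      omega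
    have hplen : 1 ≤ p.length := by
      cases p with | nil => exact absurd rfl hpne | cons _ _ => simp
    have hlen' : r.length ≤ p.dropLast.length := by
      simp only [List.length_dropLast]
      simp only [List.length_cons] at hlen
      omega
    rw [ih p.dropLast (g.erase M) (t - M) hperm'
        (hsorted.sublist (List.dropLast_sublist p)) hsum' hlen']
    rw [List.dropLast_eq_take, List.take_take]
    congr 2
    simp only [List.length_take, List.length_cons]
    omega

-- ===== VERDICT (by name: the statement is the Claim_ definition above) =====
theorem solution_spec : Claim_equal_solution := by
  intro n k sensors _
  unfold Spec_solution solution solution_alt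
  simp only []
  generalize PySem.List.sorted (PySem.Set.ofList sensors) (fun x : Int => x) false = s
  rcases eq_or_ne s [] with hnil | hnil
  · subst hnil
    rw [if_pos (Or.inl (rfl : ([] : List Int) = []))]
    by_cases hk : k ≥ ((List.length ([] : List Int) : Int))
    · rw [if_pos hk]
    · rw [if_neg hk]
      rw [show ((List.length ([] : List Int) : Int)) - 1 = -1 by simp]
      rw [PySem.List.pyRange_one_eq_nil (by omega)]
      simp [pop_loop_eq_take]
  · by_cases hk : k ≥ (s.length : Int)
    · rw [if_pos hk, if_pos (Or.inr hk)]
    · rw [if_neg hk, if_neg (by push_neg; exact ⟨hnil, lt_of_not_ge hk⟩)]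
      rw [gaps_eq s]
      set g := (s.zip (PySem.List.slice s (some 1) none)).map (fun p => p.2 - p.1) with hg
      set p := PySem.List.sorted g (fun x : Int => x) false with hp
      obtain ⟨a, t, rfl⟩ := List.exists_cons_of_ne_nil hnil
      have hglen : g.length = t.length := by
        rw [hg, PySem.List.slice_from_one]
        simp [List.length_zip]
      have hlenr : (PySem.List.pyRange 0 (k-1) 1).length ≤ p.length := by
        rw [PySem.List.length_pyRange_one, hp, PySem.List.length_sorted, hglen]
        simp only [List.length_cons] at hk
        omega
      have hgperm : g.Perm p := (PySem.List.sorted_perm g _ false).symm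
      have hsorted : p.Pairwise (· ≤ ·) := by
        have := PySem.List.sorted_pairwise g (fun x : Int => x)
        simpa [hp] using this
      have htel : PySem.List.pyGetD (a::t) (-1) 0 - PySem.List.pyGetD (a::t) (0:Int) 0 = g.sum := by
        rw [pyGetD_cons_neg_one, hg, PySem.List.slice_from_one]
        have hhead : PySem.List.pyGetD (a::t) (0:Int) 0 = a := by
          simpa using PySem.List.pyGetD_natCast (a::t) 0 0
        rw [hhead]
        simpa using (gaps_sum_telescope a t).symm
      rw [pop_loop_eq_take, foldl_add_eq_sum,
          bLoop (PySem.List.pyRange 0 (k-1) 1) p g _ hgperm hsorted htel hlenr]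
      simp
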